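-- pv_equiv track=rewrite | github.com/JorgeAguirreStreicher/compustar-project | python/pipeline_utils.py | round_059
-- ===== SOURCE A (Python) =====
-- def round_059(value: int) -> int:
--     if value <= 0:
--         return max(0, value)
--     endings = (0, 5, 9)
--     base_tens = value // 10
--     best = None
--     best_diff = None
--     for tens_delta in range(-2, 3):
--         tens = base_tens + tens_delta
--         if tens < 0:
--             continue
--         for ending in endings:
--             candidate = tens * 10 + ending
--             if candidate <= 0:
--                 continue
--             diff = abs(candidate - value)
--             if best is None or diff < best_diff or (diff == best_diff and candidate < best):
--                 best = candidate
--                 best_diff = diff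
--     if best is None:
--         return max(0, value)
--     return best
-- ===== SOURCE B (Python) =====
-- def round_059(value: int) -> int:
--     if value <= 0:
--         return max(0, value)
--     if value < 10:
--         return 5 if value <= 7 else 9
--     return value + (0, -1, -2, 2, 1, 0, -1, -2, 1, 0)[value % 10]
-- ===== Notes on version B (the rewrite author's own statement) =====
-- stated objective: simpler
-- what changed: A searches 15 candidates over five decades with a best/best_diff loop; B is a closed form with no candidate search at all: for value >= 10 it adds a fixed offset looked up by the last digit (table indexed by value % 10), and for 1..9 it returns 5 or 9 directly.
import Mathlib
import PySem

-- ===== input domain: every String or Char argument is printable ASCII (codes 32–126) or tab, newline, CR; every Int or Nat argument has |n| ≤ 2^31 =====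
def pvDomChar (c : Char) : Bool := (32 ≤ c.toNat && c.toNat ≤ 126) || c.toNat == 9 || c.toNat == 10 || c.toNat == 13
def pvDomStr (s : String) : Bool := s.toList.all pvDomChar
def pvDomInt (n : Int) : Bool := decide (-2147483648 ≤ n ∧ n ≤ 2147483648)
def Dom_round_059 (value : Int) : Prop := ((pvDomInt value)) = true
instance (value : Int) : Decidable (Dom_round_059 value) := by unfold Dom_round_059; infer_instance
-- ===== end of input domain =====

-- B replaces A's 15-candidate search with a closed form: for value ≥ 10, add a fixed
-- offset looked up by the last digit (value % 10); for 1..9, return 5 or 9 directly. Simpler.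

-- ===== PORT A =====
-- Python's abs on ints, ported by hand (exact)
def pyAbsI (x : Int) : Int := if x < 0 then -x else x

-- body of A's inner loop: one candidate against the running (best, best_diff)
-- (Python's pair of Nones is the `none` state; once best is set, best_diff is set too)
def stepA (value : Int) (st : Option (Int × Int)) (candidate : Int) : Option (Int × Int) :=
  if candidate ≤ 0 then st
  else
    let diff := pyAbsI (candidate - value)
    match st with
    | none => some (candidate, diff)
    | some (best, best_diff) =>
      if diff < best_diff ∨ (diff = best_diff ∧ candidate < best) then some (candidate, diff)
      else some (best, best_diff)

def round_059 (value : Int) : Int :=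
  if value ≤ 0 then max 0 value
  else
    let endings : List Int := [0, 5, 9]
    let base_tens := PySem.Int.floordiv value 10
    let st :=
      (PySem.List.pyRange (-2) 3 1).foldl (fun (st : Option (Int × Int)) tens_delta =>
        let tens := base_tens + tens_delta
        if tens < 0 then st
        else endings.foldl (fun st ending => stepA value st (tens * 10 + ending)) st) none
    match st with
    | none => max 0 value
    | some (best, _) => best

-- ===== PORT B =====
-- the Python tuple (0, -1, -2, 2, 1, 0, -1, -2, 1, 0), indexed by value % 10
def offTbl : List Int := [0, -1, -2, 2, 1, 0, -1, -2, 1, 0]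

def round_059_alt (value : Int) : Int :=
  if value ≤ 0 then max 0 value
  else if value < 10 then (if value ≤ 7 then 5 else 9)
  -- tuple indexing tbl[value % 10]: the index is always in 0..9, so pyGet? never returns none
  else value + (PySem.List.pyGet? offTbl (PySem.Int.mod value 10)).getD 0

-- ===== PRECONDITION & SPEC =====
def Spec_round_059 (value : Int) (out : Int) : Prop := out = round_059_alt value
instance (value : Int) (out : Int) : Decidable (Spec_round_059 value out) := by unfold Spec_round_059; infer_instance

-- ===== CLAIM (what is proved, stated in full; the proofs are below) =====
def Claim_equal_round_059 : Prop := ∀ (value : Int), Dom_round_059 value → Spec_round_059 value (round_059 value)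

-- ===== LEMMAS AND PROOFS =====

-- strict lexicographic order on the key (|c - v|, c) that A's update rule implements
abbrev klt (v a b : Int) : Prop :=
  pyAbsI (a - v) < pyAbsI (b - v) ∨ (pyAbsI (a - v) = pyAbsI (b - v) ∧ a < b)

theorem klt_asymm {v a b : Int} (h1 : klt v a b) (h2 : klt v b a) : False := by
  simp only [klt, pyAbsI] at *; split_ifs at * <;> omega

theorem not_klt {v a b : Int} (h : ¬ klt v a b) : b = a ∨ klt v b a := by
  simp only [klt, pyAbsI] at *; split_ifs at * <;> omega

-- A's fold, abstracted over the candidate list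
def F (v : Int) (st : Option (Int × Int)) (L : List Int) : Option (Int × Int) :=
  L.foldl (stepA v) st

theorem F_cons (v : Int) (st : Option (Int × Int)) (x : Int) (L : List Int) :
    F v st (x :: L) = F v (stepA v st x) L := rfl

theorem stepA_nonpos (v : Int) (st : Option (Int × Int)) (c : Int) (h : c ≤ 0) :
    stepA v st c = st := by simp [stepA, h]

theorem stepA_pos_none (v c : Int) (h : 0 < c) :
    stepA v none c = some (c, pyAbsI (c - v)) := by
  rw [stepA, if_neg (by omega)]

theorem stepA_some (v b x : Int) (h : 0 < x) :
    stepA v (some (b, pyAbsI (b - v))) x =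
      if pyAbsI (x - v) < pyAbsI (b - v) ∨ (pyAbsI (x - v) = pyAbsI (b - v) ∧ x < b)
      then some (x, pyAbsI (x - v)) else some (b, pyAbsI (b - v)) := by
  rw [stepA, if_neg (by omega)]

-- the candidates A visits (tens from q-2 to q+2, endings 0/5/9), in A's syntactic form
def L15 (q : Int) : List Int :=
  [(q + -2) * 10 + 0, (q + -2) * 10 + 5, (q + -2) * 10 + 9,
   (q + -1) * 10 + 0, (q + -1) * 10 + 5, (q + -1) * 10 + 9,
   (q + 0) * 10 + 0, (q + 0) * 10 + 5, (q + 0) * 10 + 9,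
   (q + 1) * 10 + 0, (q + 1) * 10 + 5, (q + 1) * 10 + 9,
   (q + 2) * 10 + 0, (q + 2) * 10 + 5, (q + 2) * 10 + 9]

-- completeness: F returns the strict klt-minimum if the list has one
theorem F_min_go (v m : Int) : ∀ (L : List Int) (b : Int),
    (b = m ∨ klt v m b) →
    (∀ c ∈ L, 0 < c → c = m ∨ klt v m c) →
    ((m ∈ L ∧ 0 < m) ∨ b = m) →
    F v (some (b, pyAbsI (b - v))) L = some (m, pyAbsI (m - v)) := by
  intro L
  induction L with
  | nil =>
    intro b _ _ h3
    rcases h3 with ⟨h, _⟩ | rfl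
    · simp at h
    · rfl
  | cons x L ih =>
    intro b h1 h2 h3
    rw [F_cons]
    by_cases hx : 0 < x
    · rw [stepA_some v b x hx]
      by_cases hC : pyAbsI (x - v) < pyAbsI (b - v) ∨ (pyAbsI (x - v) = pyAbsI (b - v) ∧ x < b)
      · rw [if_pos hC]
        refine ih x (h2 x (by simp) hx) (fun c hc hcp => h2 c (by simp [hc]) hcp) ?_
        rcases h2 x (by simp) hx with rfl | hmx
        · exact Or.inr rfl
        · rcases h3 with ⟨hmL, hmp⟩ | rfl
          · rcases List.mem_cons.mp hmL with rfl | hmL'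
            · exact Or.inr rfl
            · exact Or.inl ⟨hmL', hmp⟩
          · exact (klt_asymm hmx hC).elim
      · rw [if_neg hC]
        refine ih b h1 (fun c hc hcp => h2 c (by simp [hc]) hcp) ?_
        rcases h3 with ⟨hmL, hmp⟩ | rfl
        · rcases List.mem_cons.mp hmL with rfl | hmL'
          · rcases not_klt hC with heq | hbm
            · exact Or.inr heq
            · rcases h1 with rfl | hmb
              · exact Or.inr rfl
              · exact (klt_asymm hmb hbm).elim
          · exact Or.inl ⟨hmL', hmp⟩
        · exact Or.inr rfl
    · rw [stepA_nonpos v _ x (by omega)]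
      refine ih b h1 (fun c hc hcp => h2 c (by simp [hc]) hcp) ?_
      rcases h3 with ⟨hmL, hmp⟩ | rfl
      · rcases List.mem_cons.mp hmL with rfl | hmL'
        · omega
        · exact Or.inl ⟨hmL', hmp⟩
      · exact Or.inr rfl

theorem F_min (v : Int) : ∀ (L : List Int) (m : Int),
    m ∈ L → 0 < m → (∀ c ∈ L, 0 < c → c = m ∨ klt v m c) →
    F v none L = some (m, pyAbsI (m - v)) := by
  intro L
  induction L with
  | nil => intro m h; simp at h
  | cons x L ih =>
    intro m hmL hmp hall
    rw [F_cons]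
    by_cases hx : 0 < x
    · rw [stepA_pos_none v x hx]
      refine F_min_go v m L x (hall x (by simp) hx) (fun c hc hcp => hall c (by simp [hc]) hcp) ?_
      rcases List.mem_cons.mp hmL with rfl | hmL'
      · exact Or.inr rfl
      · exact Or.inl ⟨hmL', hmp⟩
    · rw [stepA_nonpos v _ x (by omega)]
      refine ih m ?_ hmp (fun c hc hcp => hall c (by simp [hc]) hcp)
      rcases List.mem_cons.mp hmL with rfl | hmL'
      · omega
      · exact hmL'

-- A's loop is F over L15
theorem bridgeA (v : Int) (h : 0 < v) :
    round_059 v = (match F v none (L15 (v / 10)) with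
      | none => max 0 v
      | some (b, _) => b) := by
  have hq0 : 0 ≤ v / 10 := Int.ediv_nonneg h.le (by norm_num)
  have hfd : PySem.Int.floordiv v 10 = v / 10 :=
    PySem.Int.floordiv_eq_ediv_of_pos (by norm_num)
  have hR : PySem.List.pyRange (-2) 3 1 = [-2, -1, 0, 1, 2] := by decide
  simp only [round_059, hfd, hR, if_neg (show ¬ v ≤ 0 by omega)]
  simp only [F, L15, List.foldl_cons, List.foldl_nil]
  set q := v / 10 with hq
  by_cases h1 : q + -1 < 0
  · rw [if_pos (show q + -2 < 0 by omega), if_pos h1,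
        if_neg (show ¬ q + 0 < 0 by omega), if_neg (show ¬ q + 1 < 0 by omega),
        if_neg (show ¬ q + 2 < 0 by omega),
        stepA_nonpos v none ((q + -2) * 10 + 0) (by omega),
        stepA_nonpos v none ((q + -2) * 10 + 5) (by omega),
        stepA_nonpos v none ((q + -2) * 10 + 9) (by omega),
        stepA_nonpos v none ((q + -1) * 10 + 0) (by omega),
        stepA_nonpos v none ((q + -1) * 10 + 5) (by omega),
        stepA_nonpos v none ((q + -1) * 10 + 9) (by omega)]
  · by_cases h2 : q + -2 < 0
    · rw [if_pos h2, if_neg h1,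
          if_neg (show ¬ q + 0 < 0 by omega), if_neg (show ¬ q + 1 < 0 by omega),
          if_neg (show ¬ q + 2 < 0 by omega),
          stepA_nonpos v none ((q + -2) * 10 + 0) (by omega),
          stepA_nonpos v none ((q + -2) * 10 + 5) (by omega),
          stepA_nonpos v none ((q + -2) * 10 + 9) (by omega)]
    · rw [if_neg h2, if_neg h1,
          if_neg (show ¬ q + 0 < 0 by omega), if_neg (show ¬ q + 1 < 0 by omega),
          if_neg (show ¬ q + 2 < 0 by omega)]

-- if m is the strict klt-minimum of A's candidate list, A returns m
theorem A_eq_min (v m : Int) (hv : 0 < v) (hmem : m ∈ L15 (v / 10)) (hmp : 0 < m)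
    (hmin : ∀ c ∈ L15 (v / 10), 0 < c → c = m ∨ klt v m c) : round_059 v = m := by
  rw [bridgeA v hv, F_min v _ m hmem hmp hmin]

theorem main_eq (v : Int) : round_059 v = round_059_alt v := by
  by_cases hv : v ≤ 0
  · simp [round_059, round_059_alt, hv]
  · replace hv : 0 < v := by omega
    have hdm : 10 * (v / 10) + v % 10 = v := Int.mul_ediv_add_emod v 10
    have hm0 : 0 ≤ v % 10 := Int.emod_nonneg v (by norm_num)
    have hm9 : v % 10 < 10 := Int.emod_lt_of_pos v (by norm_num)
    have hmod : PySem.Int.mod v 10 = v % 10 := PySem.Int.mod_eq_emod_of_pos (by norm_num)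
    by_cases h10 : v < 10
    · -- 1 ≤ v ≤ 9 : q = 0
      have hq : v / 10 = 0 := by omega
      have hB : round_059_alt v = if v ≤ 7 then 5 else 9 := by
        simp [round_059_alt, if_neg (show ¬ v ≤ 0 by omega), if_pos h10]
      by_cases h7 : v ≤ 7
      · rw [hB, if_pos h7]
        refine A_eq_min v 5 hv ?_ (by norm_num) ?_
        · rw [hq]; simp [L15]
        · rw [hq]; intro c hc hcp
          simp only [L15, List.mem_cons, List.not_mem_nil, or_false] at hc
          rcases hc with rfl|rfl|rfl|rfl|rfl|rfl|rfl|rfl|rfl|rfl|rfl|rfl|rfl|rfl|rfl <;>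
            (simp only [klt, pyAbsI]; split_ifs <;> omega)
      · rw [hB, if_neg h7]
        refine A_eq_min v 9 hv ?_ (by norm_num) ?_
        · rw [hq]; simp [L15]
        · rw [hq]; intro c hc hcp
          simp only [L15, List.mem_cons, List.not_mem_nil, or_false] at hc
          rcases hc with rfl|rfl|rfl|rfl|rfl|rfl|rfl|rfl|rfl|rfl|rfl|rfl|rfl|rfl|rfl <;>
            (simp only [klt, pyAbsI]; split_ifs <;> omega)
    · -- v ≥ 10 : closed form v + offTbl[v % 10]
      replace h10 : 10 ≤ v := by omega
      have hd : v % 10 = 0 ∨ v % 10 = 1 ∨ v % 10 = 2 ∨ v % 10 = 3 ∨ v % 10 = 4 ∨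
          v % 10 = 5 ∨ v % 10 = 6 ∨ v % 10 = 7 ∨ v % 10 = 8 ∨ v % 10 = 9 := by omega
      have hB : ∀ off : Int, (PySem.List.pyGet? offTbl (v % 10)).getD 0 = off →
          round_059_alt v = v + off := by
        intro off hoff
        simp only [round_059_alt, if_neg (show ¬ v ≤ 0 by omega),
          if_neg (show ¬ v < 10 by omega), hmod, hoff]
      have key : ∀ off : Int, (PySem.List.pyGet? offTbl (v % 10)).getD 0 = off →
          (v + off ∈ L15 (v / 10) ∧ 0 < v + off ∧
            ∀ c ∈ L15 (v / 10), 0 < c → c = v + off ∨ klt v (v + off) c) →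
          round_059 v = round_059_alt v := by
        intro off hoff ⟨hmem, hmp, hmin⟩
        rw [hB off hoff, A_eq_min v (v + off) hv hmem hmp hmin]
      rcases hd with hk|hk|hk|hk|hk|hk|hk|hk|hk|hk
      · refine key 0 (by rw [hk]; try decide)
          ⟨by simp only [L15, List.mem_cons, List.not_mem_nil, or_false]; omega, by omega, ?_⟩
        intro c hc hcp
        simp only [L15, List.mem_cons, List.not_mem_nil, or_false] at hc
        rcases hc with rfl|rfl|rfl|rfl|rfl|rfl|rfl|rfl|rfl|rfl|rfl|rfl|rfl|rfl|rfl <;>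
          (simp only [klt, pyAbsI]; split_ifs <;> omega)
      · refine key (-1) (by rw [hk]; try decide)
          ⟨by simp only [L15, List.mem_cons, List.not_mem_nil, or_false]; omega, by omega, ?_⟩
        intro c hc hcp
        simp only [L15, List.mem_cons, List.not_mem_nil, or_false] at hc
        rcases hc with rfl|rfl|rfl|rfl|rfl|rfl|rfl|rfl|rfl|rfl|rfl|rfl|rfl|rfl|rfl <;>
          (simp only [klt, pyAbsI]; split_ifs <;> omega)
      · refine key (-2) (by rw [hk]; try decide)
          ⟨by simp only [L15, List.mem_cons, List.not_mem_nil, or_false]; omega, by omega, ?_⟩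
        intro c hc hcp
        simp only [L15, List.mem_cons, List.not_mem_nil, or_false] at hc
        rcases hc with rfl|rfl|rfl|rfl|rfl|rfl|rfl|rfl|rfl|rfl|rfl|rfl|rfl|rfl|rfl <;>
          (simp only [klt, pyAbsI]; split_ifs <;> omega)
      · refine key 2 (by rw [hk]; try decide)
          ⟨by simp only [L15, List.mem_cons, List.not_mem_nil, or_false]; omega, by omega, ?_⟩
        intro c hc hcp
        simp only [L15, List.mem_cons, List.not_mem_nil, or_false] at hc
        rcases hc with rfl|rfl|rfl|rfl|rfl|rfl|rfl|rfl|rfl|rfl|rfl|rfl|rfl|rfl|rfl <;>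
          (simp only [klt, pyAbsI]; split_ifs <;> omega)
      · refine key 1 (by rw [hk]; try decide)
          ⟨by simp only [L15, List.mem_cons, List.not_mem_nil, or_false]; omega, by omega, ?_⟩
        intro c hc hcp
        simp only [L15, List.mem_cons, List.not_mem_nil, or_false] at hc
        rcases hc with rfl|rfl|rfl|rfl|rfl|rfl|rfl|rfl|rfl|rfl|rfl|rfl|rfl|rfl|rfl <;>
          (simp only [klt, pyAbsI]; split_ifs <;> omega)
      · refine key 0 (by rw [hk]; try decide)
          ⟨by simp only [L15, List.mem_cons, List.not_mem_nil, or_false]; omega, by omega, ?_⟩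
        intro c hc hcp
        simp only [L15, List.mem_cons, List.not_mem_nil, or_false] at hc
        rcases hc with rfl|rfl|rfl|rfl|rfl|rfl|rfl|rfl|rfl|rfl|rfl|rfl|rfl|rfl|rfl <;>
          (simp only [klt, pyAbsI]; split_ifs <;> omega)
      · refine key (-1) (by rw [hk]; try decide)
          ⟨by simp only [L15, List.mem_cons, List.not_mem_nil, or_false]; omega, by omega, ?_⟩
        intro c hc hcp
        simp only [L15, List.mem_cons, List.not_mem_nil, or_false] at hc
        rcases hc with rfl|rfl|rfl|rfl|rfl|rfl|rfl|rfl|rfl|rfl|rfl|rfl|rfl|rfl|rfl <;>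
          (simp only [klt, pyAbsI]; split_ifs <;> omega)
      · refine key (-2) (by rw [hk]; try decide)
          ⟨by simp only [L15, List.mem_cons, List.not_mem_nil, or_false]; omega, by omega, ?_⟩
        intro c hc hcp
        simp only [L15, List.mem_cons, List.not_mem_nil, or_false] at hc
        rcases hc with rfl|rfl|rfl|rfl|rfl|rfl|rfl|rfl|rfl|rfl|rfl|rfl|rfl|rfl|rfl <;>
          (simp only [klt, pyAbsI]; split_ifs <;> omega)
      · refine key 1 (by rw [hk]; try decide)
          ⟨by simp only [L15, List.mem_cons, List.not_mem_nil, or_false]; omega, by omega, ?_⟩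
        intro c hc hcp
        simp only [L15, List.mem_cons, List.not_mem_nil, or_false] at hc
        rcases hc with rfl|rfl|rfl|rfl|rfl|rfl|rfl|rfl|rfl|rfl|rfl|rfl|rfl|rfl|rfl <;>
          (simp only [klt, pyAbsI]; split_ifs <;> omega)
      · refine key 0 (by rw [hk]; try decide)
          ⟨by simp only [L15, List.mem_cons, List.not_mem_nil, or_false]; omega, by omega, ?_⟩
        intro c hc hcp
        simp only [L15, List.mem_cons, List.not_mem_nil, or_false] at hc
        rcases hc with rfl|rfl|rfl|rfl|rfl|rfl|rfl|rfl|rfl|rfl|rfl|rfl|rfl|rfl|rfl <;>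
          (simp only [klt, pyAbsI]; split_ifs <;> omega)

-- ===== VERDICT (by name: the statement is the Claim_ definition above) =====
theorem round_059_spec : Claim_equal_round_059 := by
  intro value _
  unfold Spec_round_059
  exact main_eq value
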